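-- pv_equiv track=rewrite | github.com/shea256/chessglyphs | chess_board.py | isValidCastle
-- ===== SOURCE A (Python) =====
-- def isValidCastle(castle):
--     if len(castle) > 4:
--         return False
--     possible = {i: 0 for i in ["K", "Q", "k", "q", "-"]}
--     for letter in castle:
--         if letter not in possible.keys():
--             return False
--         if possible[letter]:
--             return False
--         possible[letter] = 1
--     return True
-- ===== SOURCE B (Python) =====
-- def _gen(avail, n):
--     # all strings of distinct characters drawn from avail, of length at most n
--     if n == 0:
--         return [""]
--     res = [""]
--     for i in range(len(avail)):
--         for tail in _gen(avail[:i] + avail[i + 1:], n - 1):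
--             res.append(avail[i] + tail)
--     return res
--
-- _VALID = frozenset(_gen("KQkq-", 4))
--
-- def isValidCastle(castle):
--     return castle in _VALID
-- ===== Notes on version B (the rewrite author's own statement) =====
-- stated objective: alternative
-- what changed: Replaced A's per-character seen-marking dict loop by a precomputed lookup table: B enumerates once all 206 valid castling strings (distinct symbols from 'KQkq-', length at most 4) and answers with a single frozenset membership test.
import Mathlib
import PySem

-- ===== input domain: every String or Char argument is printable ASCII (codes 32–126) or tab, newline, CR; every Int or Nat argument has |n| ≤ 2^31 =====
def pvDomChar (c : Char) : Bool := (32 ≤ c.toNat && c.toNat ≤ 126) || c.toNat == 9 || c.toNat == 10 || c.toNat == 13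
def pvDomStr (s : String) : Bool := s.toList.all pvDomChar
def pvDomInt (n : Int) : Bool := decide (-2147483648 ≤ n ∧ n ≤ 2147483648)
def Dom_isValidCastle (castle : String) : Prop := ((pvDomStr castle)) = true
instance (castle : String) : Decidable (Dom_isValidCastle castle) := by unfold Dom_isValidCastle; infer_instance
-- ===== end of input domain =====

-- B replaces A's per-character seen-marking scan by a precomputed lookup table:
-- it enumerates once all 206 valid castling strings (distinct symbols from "KQkq-",
-- length ≤ 4) and answers by a single membership test; alternative decomposition.

-- ===== PORT A =====
-- the dict comprehension {i: 0 for i in [...]}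
def pvPossible0 : PySem.Dict Char Int :=
  (['K', 'Q', 'k', 'q', '-']).foldl (fun d i => d.insert i 0) PySem.Dict.empty

-- the for-loop over `castle` with its two early returns and the marking assignment
def pvCastleLoop : List Char → PySem.Dict Char Int → Bool
  | [], _ => true
  | letter :: rest, possible =>
    if possible.contains letter = false then false
    else if possible.getD letter 0 ≠ 0 then false
    else pvCastleLoop rest (possible.insert letter 1)

def isValidCastle (castle : String) : Bool :=
  if castle.toList.length > 4 then false
  else pvCastleLoop castle.toList pvPossible0

-- ===== PORT B =====
-- `for i in range(len(avail))` paired with `avail[:i] + avail[i+1:]`: pvPick yields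
-- exactly the sequence (avail[i], avail with index i removed), in index order.
def pvPick : List Char → List (Char × List Char)
  | [] => []
  | x :: xs => (x, xs) :: (pvPick xs).map (fun p => (p.1, x :: p.2))

-- _gen(avail, n): res starts [""], then appends avail[i] + tail for each pick and tail
def pvGen : List Char → Nat → List (List Char)
  | _, 0 => [[]]
  | avail, Nat.succ n =>
      [] :: (pvPick avail).flatMap (fun p => (pvGen p.2 n).map (fun t => p.1 :: t))

-- _VALID = frozenset(_gen("KQkq-", 4)); isValidCastle = castle in _VALID
def isValidCastle_alt (castle : String) : Bool :=
  (PySem.Set.ofList (pvGen ['K', 'Q', 'k', 'q', '-'] 4)).contains castle.toList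

-- ===== PRECONDITION & SPEC =====
def Spec_isValidCastle (castle : String) (out : Bool) : Prop := out = isValidCastle_alt castle
instance (castle : String) (out : Bool) : Decidable (Spec_isValidCastle castle out) := by unfold Spec_isValidCastle; infer_instance

-- ===== CLAIM (what is proved, stated in full; the proofs are below) =====
def Claim_equal_isValidCastle : Prop := ∀ (castle : String), Dom_isValidCastle castle → Spec_isValidCastle castle (isValidCastle castle)

-- ===== LEMMAS AND PROOFS =====

lemma pvPossible0_getD (c : Char) : pvPossible0.getD c 0 = 0 := by
  simp [pvPossible0, List.foldl, PySem.Dict.getD_insert, PySem.Dict.getD_empty]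

lemma pvPossible0_contains (c : Char) :
    pvPossible0.contains c = true ↔ c ∈ ['K', 'Q', 'k', 'q', '-'] := by
  simp [pvPossible0, List.foldl, PySem.Dict.contains_insert, PySem.Dict.contains_empty]
  tauto

lemma pvCastleLoop_iff (cs : List Char) (d : PySem.Dict Char Int) :
    pvCastleLoop cs d = true ↔
      cs.Nodup ∧ ∀ c ∈ cs, d.contains c = true ∧ d.getD c 0 = 0 := by
  induction cs generalizing d with
  | nil => simp [pvCastleLoop]
  | cons x xs ih =>
    simp only [pvCastleLoop]
    by_cases hc : d.contains x = true
    · by_cases hv : d.getD x 0 = 0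
      · rw [if_neg (by simp [hc]), if_neg (by simp [hv]), ih]
        constructor
        · rintro ⟨hnd, hall⟩
          have hxmem : x ∉ xs := by
            intro hx
            have := (hall x hx).2
            rw [PySem.Dict.getD_insert] at this
            simp at this
          refine ⟨List.nodup_cons.mpr ⟨hxmem, hnd⟩, ?_⟩
          intro c hcm
          rcases List.mem_cons.mp hcm with rfl | hcm'
          · exact ⟨hc, hv⟩
          · have h2 := hall c hcm'
            have hne : c ≠ x := by rintro rfl; exact hxmem hcm'
            rw [PySem.Dict.contains_insert, PySem.Dict.getD_insert] at h2
            simp [hne] at h2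
            exact h2
        · rintro ⟨hnd, hall⟩
          have hxmem := (List.nodup_cons.mp hnd).1
          refine ⟨(List.nodup_cons.mp hnd).2, ?_⟩
          intro c hcm
          have h2 := hall c (List.mem_cons_of_mem _ hcm)
          have hne : c ≠ x := by rintro rfl; exact hxmem hcm
          rw [PySem.Dict.contains_insert, PySem.Dict.getD_insert]
          simp [hne]
          exact h2
      · rw [if_neg (by simp [hc]), if_pos hv]
        simp only [Bool.false_eq_true, false_iff]
        rintro ⟨-, hall⟩
        exact hv (hall x (List.mem_cons_self)).2
    · rw [if_pos (by simpa using hc)]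
      simp only [Bool.false_eq_true, false_iff]
      rintro ⟨-, hall⟩
      exact hc (hall x (List.mem_cons_self)).1

lemma A_iff (castle : String) :
    isValidCastle castle = true ↔
      castle.toList.length ≤ 4 ∧ castle.toList.Nodup ∧
        ∀ c ∈ castle.toList, c ∈ ['K', 'Q', 'k', 'q', '-'] := by
  unfold isValidCastle
  by_cases h4 : castle.toList.length > 4
  · simp only [if_pos h4, Bool.false_eq_true, false_iff]
    rintro ⟨h, -⟩; omega
  · rw [if_neg h4, pvCastleLoop_iff]
    constructor
    · rintro ⟨hnd, hall⟩
      exact ⟨by omega, hnd, fun c hc => (pvPossible0_contains c).mp (hall c hc).1⟩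
    · rintro ⟨-, hnd, hall⟩
      exact ⟨hnd, fun c hc => ⟨(pvPossible0_contains c).mpr (hall c hc), pvPossible0_getD c⟩⟩

lemma pvPick_mem {l : List Char} (hnd : l.Nodup) (c : Char) (r : List Char) :
    (c, r) ∈ pvPick l ↔ c ∈ l ∧ r = l.erase c := by
  induction l generalizing r with
  | nil => simp [pvPick]
  | cons x xs ih =>
    have hx : x ∉ xs := (List.nodup_cons.mp hnd).1
    have hxs : xs.Nodup := (List.nodup_cons.mp hnd).2
    simp only [pvPick, List.mem_cons, List.mem_map]
    constructor
    · rintro (h | ⟨⟨pc, pr⟩, hp, hpe⟩)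
      · obtain ⟨h1, h2⟩ := Prod.ext_iff.mp h
        subst h1; subst h2
        simp [List.erase_cons_head]
      · obtain ⟨h1, h2⟩ := Prod.ext_iff.mp hpe
        simp only at h1 h2
        subst h1
        have hmem := (ih hxs pr).mp hp
        have hcx : pc ≠ x := by rintro rfl; exact hx hmem.1
        refine ⟨Or.inr hmem.1, ?_⟩
        rw [← h2, List.erase_cons_tail (by simp; exact fun e => hcx e.symm), hmem.2]
    · rintro ⟨hc, hr⟩
      rcases hc with rfl | hc
      · left; rw [hr, List.erase_cons_head]
      · right
        have hcx : c ≠ x := by rintro rfl; exact hx hc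
        refine ⟨(c, xs.erase c), (ih hxs _).mpr ⟨hc, rfl⟩, ?_⟩
        rw [hr, List.erase_cons_tail (by simp; exact fun e => hcx e.symm)]

lemma pvGen_mem (n : Nat) (avail : List Char) (hnd : avail.Nodup) (l : List Char) :
    l ∈ pvGen avail n ↔ l.length ≤ n ∧ l.Nodup ∧ ∀ c ∈ l, c ∈ avail := by
  induction n generalizing avail l with
  | zero => cases l <;> simp [pvGen]
  | succ n ih =>
    simp only [pvGen, List.mem_cons, List.mem_flatMap, List.mem_map]
    constructor
    · rintro (rfl | ⟨⟨c, r⟩, hp, t, ht, rfl⟩)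
      · simp
      · obtain ⟨hc, rfl⟩ := (pvPick_mem hnd c r).mp hp
        have := (ih _ (hnd.erase c) t).mp ht
        refine ⟨by simpa using this.1, ?_, ?_⟩
        · refine List.nodup_cons.mpr ⟨?_, this.2.1⟩
          intro hcl
          exact (List.Nodup.mem_erase_iff hnd).mp (this.2.2 c hcl) |>.1 rfl
        · intro x hx
          rcases List.mem_cons.mp hx with rfl | hx
          · exact hc
          · exact ((List.Nodup.mem_erase_iff hnd).mp (this.2.2 x hx)).2
    · rintro ⟨hlen, hndl, hall⟩
      cases l with
      | nil => exact Or.inl rfl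
      | cons c t =>
        right
        have hc : c ∈ avail := hall c List.mem_cons_self
        refine ⟨(c, avail.erase c), (pvPick_mem hnd c _).mpr ⟨hc, rfl⟩, t, ?_, rfl⟩
        refine (ih _ (hnd.erase c) t).mpr ⟨by simpa using hlen, (List.nodup_cons.mp hndl).2, ?_⟩
        intro x hx
        refine (List.Nodup.mem_erase_iff hnd).mpr ⟨?_, hall x (List.mem_cons_of_mem _ hx)⟩
        rintro rfl
        exact (List.nodup_cons.mp hndl).1 hx
lemma B_iff (castle : String) :
    isValidCastle_alt castle = true ↔
      castle.toList.length ≤ 4 ∧ castle.toList.Nodup ∧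
        ∀ c ∈ castle.toList, c ∈ ['K', 'Q', 'k', 'q', '-'] := by
  unfold isValidCastle_alt
  rw [PySem.Set.contains_iff, PySem.Set.mem_ofList,
    pvGen_mem 4 _ (by decide) castle.toList]

-- ===== VERDICT (by name: the statement is the Claim_ definition above) =====
theorem isValidCastle_spec : Claim_equal_isValidCastle := by
  intro castle _
  unfold Spec_isValidCastle
  rw [Bool.eq_iff_iff, A_iff, B_iff]
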